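-- pv_equiv track=rewrite | github.com/Maahi10001/DSA-KMIT | Day-38/Day-38-p1.py | getthelength
-- ===== SOURCE A (Python) =====
-- def getthelength(arr,s):
--     a=[]
--     for i in arr:
--         count=0
--         for j in range(len(i)):
--             if i[j] in s:
--                 count+=1
--         if(count==len(i)):
--             a.append(count)
--     return sum(a)
-- ===== SOURCE B (Python) =====
-- def getthelength(arr, s):
--     allowed = set(s)
--     bad = [0]
--     for ch in ''.join(arr):
--         bad.append(bad[-1] + (ch not in allowed))
--     total = 0
--     pos = 0
--     for w in arr:
--         end = pos + len(w)
--         if bad[end] == bad[pos]: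
--             total += len(w)
--         pos = end
--     return total
-- ===== Notes on version B (the rewrite author's own statement) =====
-- stated objective: alternative
-- what changed: Instead of A's per-string character-counting loop, B flattens all words into one text, builds a prefix-sum array of forbidden-character counts over it once, and then decides each word by comparing two prefix-sum entries at its segment boundaries, adding len(w) directly.
import Mathlib
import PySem

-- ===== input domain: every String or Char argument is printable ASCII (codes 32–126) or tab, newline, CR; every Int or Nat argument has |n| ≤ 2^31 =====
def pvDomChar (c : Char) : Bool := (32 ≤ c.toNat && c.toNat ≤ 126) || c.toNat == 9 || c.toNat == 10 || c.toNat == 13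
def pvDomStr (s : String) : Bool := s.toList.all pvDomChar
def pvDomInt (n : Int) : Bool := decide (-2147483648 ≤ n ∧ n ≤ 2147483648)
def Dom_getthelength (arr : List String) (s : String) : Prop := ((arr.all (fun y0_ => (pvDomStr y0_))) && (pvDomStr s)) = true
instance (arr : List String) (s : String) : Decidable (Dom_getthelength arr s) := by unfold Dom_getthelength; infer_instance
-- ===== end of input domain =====

-- B flattens the words into one text, builds a prefix-sum array of forbidden-character
-- counts over it, and sums len(w) for the words whose segment contains no forbidden char
-- (alternative algorithm: prefix sums over the flattened corpus instead of A's
-- per-string counting loop).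

-- ===== PORT A =====
def getthelength (arr : List String) (s : String) : Int :=
  let a := arr.foldl (fun (a : List Int) i =>
    let count : Int := (PySem.List.pyRange 0 (PySem.Chars.len i.toList) 1).foldl
      (fun (count : Int) j =>
        if PySem.Chars.isIn [PySem.List.pyGetD i.toList j ' '] s.toList then count + 1 else count) 0
    if count = (PySem.Chars.len i.toList : Int) then a ++ [count] else a) []
  a.sum

-- ===== PORT B =====
-- bad[-1] ported as pyGetD bad (-1) 0 and bad[end]/bad[pos] as pyGetD bad _ 0: exact,
-- since those Python indexings are always in range (bad is nonempty, 0 ≤ pos ≤ end ≤ len(bad)-1).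
def getthelength_alt (arr : List String) (s : String) : Int :=
  let allowed := PySem.Set.ofList s.toList
  let bad : List Int := ((arr.map String.toList).flatten).foldl
    (fun (bp : List Int) ch =>
      bp ++ [PySem.List.pyGetD bp (-1) 0 + (if PySem.Set.contains allowed ch then 0 else 1)]) [0]
  let r := arr.foldl (fun (tp : Int × Int) w =>
    let e : Int := tp.2 + (PySem.Chars.len w.toList : Int)
    if PySem.List.pyGetD bad e 0 = PySem.List.pyGetD bad tp.2 0
    then (tp.1 + (PySem.Chars.len w.toList : Int), e) else (tp.1, e)) (0, 0)
  r.1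

-- ===== PRECONDITION & SPEC =====
def Spec_getthelength (arr : List String) (s : String) (out : Int) : Prop := out = getthelength_alt arr s
instance (arr : List String) (s : String) (out : Int) : Decidable (Spec_getthelength arr s out) := by unfold Spec_getthelength; infer_instance

-- ===== CLAIM (what is proved, stated in full; the proofs are below) =====
def Claim_equal_getthelength : Prop := ∀ (arr : List String) (s : String), Dom_getthelength arr s → Spec_getthelength arr s (getthelength arr s)

-- ===== LEMMAS AND PROOFS =====

-- the common value: sum of lengths of the words all of whose characters lie in s
def pvCleanSum (arr : List String) (s : String) : Int :=
  ((arr.filter (fun w => w.toList.all (fun c => decide (c ∈ s.toList)))).map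
    (fun w => (w.toList.length : Int))).sum

-- ---------- A side ----------

theorem isIn_singleton_iff (c : Char) (l : List Char) :
    PySem.Chars.isIn [c] l = true ↔ c ∈ l := by
  rw [PySem.Chars.isIn_iff_infix]
  constructor
  · intro h; exact h.mem (List.mem_singleton_self c)
  · intro h
    obtain ⟨p, q, rfl⟩ := List.append_of_mem h
    exact ⟨p, q, by simp⟩

theorem sum_ite_mem (s : List Char) : ∀ (l : List Char),
    (l.map (fun c => if c ∈ s then (1 : Int) else 0)).sum
    = (l.countP (fun c => decide (c ∈ s)) : Int)
  | [] => by simp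
  | c :: cs => by
    by_cases h : c ∈ s <;> simp [h, sum_ite_mem s cs]
    omega

theorem inner_count (i : List Char) (s : List Char) :
    (PySem.List.pyRange 0 (PySem.Chars.len i) 1).foldl
      (fun (count : Int) j =>
        if PySem.Chars.isIn [PySem.List.pyGetD i j ' '] s then count + 1 else count) 0
    = (i.countP (fun c => decide (c ∈ s)) : Int) := by
  rw [PySem.Chars.len_eq, ← PySem.List.len_eq,
    PySem.List.foldl_pyRange_zero_pyGetD i ' '
      (fun (count : Int) c => if PySem.Chars.isIn [c] s then count + 1 else count) 0]
  have hfun : (fun (acc : Int) c => if PySem.Chars.isIn [c] s then acc + 1 else acc)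
      = (fun (acc : Int) c => acc + (if c ∈ s then (1 : Int) else 0)) := by
    funext acc c
    by_cases h : c ∈ s
    · rw [if_pos ((isIn_singleton_iff c s).mpr h), if_pos h]
    · rw [if_neg (fun hb => h ((isIn_singleton_iff c s).mp hb)), if_neg h, add_zero]
  rw [hfun, PySem.List.foldl_add, sum_ite_mem s i]
  exact zero_add _

-- `count == len(i)` is exactly "every character of i lies in s"
theorem count_eq_iff_all (i : List Char) (s : List Char) :
    ((i.countP (fun c => decide (c ∈ s)) : Int) = (i.length : Int)) ↔
    i.all (fun c => decide (c ∈ s)) = true := by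
  rw [List.all_eq_true]
  constructor
  · intro h x hx
    have hc : i.countP (fun c => decide (c ∈ s)) = i.length := by exact_mod_cast h
    exact List.countP_eq_length.mp hc x hx
  · intro h
    have : i.countP (fun c => decide (c ∈ s)) = i.length := List.countP_eq_length.mpr h
    exact_mod_cast this

theorem A_loop (arr : List String) (s : String) (acc : List Int) :
    (arr.foldl (fun (a : List Int) i =>
      let count : Int := (PySem.List.pyRange 0 (PySem.Chars.len i.toList) 1).foldl
        (fun (count : Int) j =>
          if PySem.Chars.isIn [PySem.List.pyGetD i.toList j ' '] s.toList then count + 1 else count) 0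
      if count = (PySem.Chars.len i.toList : Int) then a ++ [count] else a) acc).sum
    = acc.sum + pvCleanSum arr s := by
  induction arr generalizing acc with
  | nil => simp [pvCleanSum]
  | cons i rest ih =>
      simp only [List.foldl_cons]
      rw [inner_count i.toList s.toList]
      have hcl : pvCleanSum (i :: rest) s
          = (if i.toList.all (fun c => decide (c ∈ s.toList)) = true
              then (i.toList.length : Int) else 0) + pvCleanSum rest s := by
        by_cases h : i.toList.all (fun c => decide (c ∈ s.toList)) = true
        · simp [pvCleanSum, List.filter_cons, h]
        · simp [pvCleanSum, List.filter_cons, h]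
      by_cases h : i.toList.all (fun c => decide (c ∈ s.toList)) = true
      · have hc : ((i.toList.countP (fun c => decide (c ∈ s.toList)) : Int)
            = (i.toList.length : Int)) := (count_eq_iff_all _ _).mpr h
        rw [PySem.Chars.len_eq, if_pos hc, ih, hcl, if_pos h, List.sum_append]
        simp [hc]
        omega
      · have hc : ¬ ((i.toList.countP (fun c => decide (c ∈ s.toList)) : Int)
            = (i.toList.length : Int)) := fun hcc => h ((count_eq_iff_all _ _).mp hcc)
        rw [PySem.Chars.len_eq, if_neg hc, ih, hcl, if_neg h, zero_add]

-- ---------- B side ----------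

-- the 0/1 indicator B adds for each character of the flattened text
def pvG (s : String) (ch : Char) : Int :=
  if PySem.Set.contains (PySem.Set.ofList s.toList) ch then 0 else 1

-- the exact prefix-sum list that B's first loop builds
def pvPsums (g : Char → Int) (c : Int) : List Char → List Int
  | [] => [c]
  | ch :: t => c :: pvPsums g (c + g ch) t

theorem psums_foldl (g : Char → Int) : ∀ (text : List Char) (acc : List Int) (c : Int),
    text.foldl (fun (bp : List Int) ch => bp ++ [PySem.List.pyGetD bp (-1) 0 + g ch]) (acc ++ [c])
    = acc ++ pvPsums g c text
  | [], acc, c => by simp [pvPsums]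
  | ch :: t, acc, c => by
    simp only [List.foldl_cons, PySem.List.pyGetD_neg_one_append_singleton]
    have : acc ++ [c] ++ [c + g ch] = (acc ++ [c]) ++ [c + g ch] := by simp
    rw [this, psums_foldl g t (acc ++ [c]) (c + g ch)]
    simp [pvPsums]

theorem psums_getD (g : Char → Int) : ∀ (text : List Char) (c : Int) (k : Nat),
    k ≤ text.length →
    (pvPsums g c text).getD k 0 = c + ((text.take k).map g).sum
  | text, c, 0, _ => by cases text <;> simp [pvPsums]
  | [], c, k + 1, h => by simp at h
  | ch :: t, c, k + 1, h => by
    have := psums_getD g t (c + g ch) k (by simpa using h)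
    simp only [pvPsums, List.take_succ_cons, List.map_cons, List.sum_cons, List.getD_cons_succ]
    rw [this]; ring

theorem psums_get (g : Char → Int) (text : List Char) (c : Int) (k : Nat)
    (h : k ≤ text.length) :
    PySem.List.pyGetD (pvPsums g c text) (k : Int) 0 = c + ((text.take k).map g).sum := by
  rw [PySem.List.pyGetD_natCast]; exact psums_getD g text c k h

-- g-sums are 0/1 counts
theorem sum_map_g (allowed : PySem.Set Char) : ∀ (l : List Char),
    (l.map (fun ch => if PySem.Set.contains allowed ch then (0 : Int) else 1)).sum
    = (l.countP (fun ch => !(PySem.Set.contains allowed ch)) : Int)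
  | [] => by simp
  | c :: cs => by
    simp only [List.map_cons, List.sum_cons, List.countP_cons, sum_map_g allowed cs]
    by_cases h : PySem.Set.contains allowed c = true <;> simp [h] <;> omega

-- the segment of w is forbidden-free iff every char of w lies in s
theorem g_zero_iff (s : String) (w : List Char) :
    ((w.map (pvG s)).sum = 0) ↔ w.all (fun c => decide (c ∈ s.toList)) = true := by
  have hcount : (w.map (pvG s)).sum
      = (w.countP (fun ch => !(PySem.Set.contains (PySem.Set.ofList s.toList) ch)) : Int) :=
    sum_map_g (PySem.Set.ofList s.toList) w
  rw [hcount, List.all_eq_true]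
  constructor
  · intro h c hc
    have h0 : w.countP (fun ch => !(PySem.Set.contains (PySem.Set.ofList s.toList) ch)) = 0 := by
      omega
    have := List.countP_eq_zero.mp h0 c hc
    simp only [Bool.not_eq_true'] at this
    have hmem : c ∈ PySem.Set.ofList s.toList := by
      by_contra hn
      rw [← PySem.Set.contains_iff] at hn
      simp_all
    simpa [PySem.Set.mem_ofList] using hmem
  · intro h
    have h0 : w.countP (fun ch => !(PySem.Set.contains (PySem.Set.ofList s.toList) ch)) = 0 := by
      rw [List.countP_eq_zero]
      intro c hc
      have hcs : c ∈ s.toList := by simpa using h c hc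
      have hmem : c ∈ PySem.Set.ofList s.toList := by simpa [PySem.Set.mem_ofList] using hcs
      rw [← PySem.Set.contains_iff] at hmem
      simp only [hmem, Bool.not_true]
      simp
    rw [h0]; simp

theorem B_loop (s : String) (text : List Char) :
    ∀ (rest : List String) (u : List Char) (total : Int),
    u ++ (rest.map String.toList).flatten = text →
    (rest.foldl (fun (tp : Int × Int) w =>
      if PySem.List.pyGetD (pvPsums (pvG s) 0 text) (tp.2 + (w.toList.length : Int)) 0
          = PySem.List.pyGetD (pvPsums (pvG s) 0 text) tp.2 0
      then (tp.1 + (w.toList.length : Int), tp.2 + (w.toList.length : Int))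
      else (tp.1, tp.2 + (w.toList.length : Int))) (total, (u.length : Int))).1
    = total + pvCleanSum rest s := by
  intro rest
  induction rest with
  | nil => intro u total _; simp [pvCleanSum]
  | cons w t ih =>
    intro u total htext
    have hposle : u.length ≤ text.length := by
      rw [← htext]; simp
    have hendle : u.length + w.toList.length ≤ text.length := by
      rw [← htext]; simp
    have htakepos : text.take u.length = u := by
      rw [← htext, List.take_append_of_le_length (by simp), List.take_length]
    have htakeend : text.take (u.length + w.toList.length) = u ++ w.toList := by
      have : u ++ (((w :: t).map String.toList).flatten) = (u ++ w.toList) ++ ((t.map String.toList).flatten) := by simp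
      rw [← htext, this, List.take_append_of_le_length (by simp)]
      simp
    have hgpos : PySem.List.pyGetD (pvPsums (pvG s) 0 text) ((u.length : Nat) : Int) 0
        = (u.map (pvG s)).sum := by
      rw [psums_get (pvG s) text 0 u.length hposle, htakepos]; ring
    have hgend : PySem.List.pyGetD (pvPsums (pvG s) 0 text) (((u.length + w.toList.length : Nat)) : Int) 0
        = (u.map (pvG s)).sum + (w.toList.map (pvG s)).sum := by
      rw [psums_get (pvG s) text 0 _ hendle, htakeend]; simp
    have hcond : (PySem.List.pyGetD (pvPsums (pvG s) 0 text) ((u.length : Int) + (w.toList.length : Int)) 0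
          = PySem.List.pyGetD (pvPsums (pvG s) 0 text) ((u.length : Nat) : Int) 0)
        ↔ w.toList.all (fun c => decide (c ∈ s.toList)) = true := by
      have hc : ((u.length : Int) + (w.toList.length : Int)) = (((u.length + w.toList.length : Nat)) : Int) := by
        push_cast; ring
      rw [hc, hgend, hgpos, ← g_zero_iff s w.toList]
      omega
    have hcl : pvCleanSum (w :: t) s
        = (if w.toList.all (fun c => decide (c ∈ s.toList)) = true
            then (w.toList.length : Int) else 0) + pvCleanSum t s := by
      by_cases h : w.toList.all (fun c => decide (c ∈ s.toList)) = true
      · simp [pvCleanSum, h]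
      · simp [pvCleanSum, h]
    have hihtext : (u ++ w.toList) ++ ((t.map String.toList).flatten) = text := by
      rw [← htext]; simp
    have hih := ih (u ++ w.toList)
    simp only [List.length_append, Nat.cast_add] at hih
    simp only [List.foldl_cons]
    by_cases h : w.toList.all (fun c => decide (c ∈ s.toList)) = true
    · rw [if_pos (hcond.mpr h), hih (total + (w.toList.length : Int)) hihtext, hcl, if_pos h]
      ring
    · rw [if_neg (fun hc => h (hcond.mp hc)), hih total hihtext, hcl, if_neg h]
      ring

-- ===== VERDICT (by name: the statement is the Claim_ definition above) =====
theorem getthelength_spec : Claim_equal_getthelength := by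
  intro arr s _
  unfold Spec_getthelength getthelength getthelength_alt
  rw [A_loop arr s []]
  have hbad : ((arr.map String.toList).flatten).foldl
      (fun (bp : List Int) ch =>
        bp ++ [PySem.List.pyGetD bp (-1) 0 +
          (if PySem.Set.contains (PySem.Set.ofList s.toList) ch then 0 else 1)]) [0]
      = pvPsums (pvG s) 0 ((arr.map String.toList).flatten) := by
    exact (psums_foldl (pvG s) ((arr.map String.toList).flatten) [] 0).trans (by simp)
  simp only [hbad, PySem.Chars.len_eq]
  have := B_loop s ((arr.map String.toList).flatten) arr [] 0 (by simp)
  simp only [List.length_nil, Nat.cast_zero] at this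
  rw [this, List.sum_nil, zero_add]
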